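-- pv_equiv track=rewrite | github.com/avolt1234/Project3_SoftwareTesting | Main.py | score4OAK
-- ===== SOURCE A (Python) =====
-- def score4OAK(roll):
--     valid = False
--
--     for num in roll:
--         if roll.count(num) >= 4:
--             valid = True
--
--     score = 0
--     if valid:
--         for num in roll:
--             score += int(num)
--         return score
--     else:
--         return 0
-- ===== SOURCE B (Python) =====
-- def score4OAK(roll):
--     s = sorted(roll)
--     if any(a == b for a, b in zip(s, s[3:])):
--         return sum(int(num) for num in roll)
--     return 0
-- ===== Notes on version B (the rewrite author's own statement) =====
-- stated objective: faster
-- what changed: Replaces A's per-die roll.count rescan (quadratic) with sort-then-scan: sort the roll once and test whether any die equals the one three positions later (zip(s, s[3:])), which in a sorted list holds iff some value occurs at least 4 times.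
import Mathlib
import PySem

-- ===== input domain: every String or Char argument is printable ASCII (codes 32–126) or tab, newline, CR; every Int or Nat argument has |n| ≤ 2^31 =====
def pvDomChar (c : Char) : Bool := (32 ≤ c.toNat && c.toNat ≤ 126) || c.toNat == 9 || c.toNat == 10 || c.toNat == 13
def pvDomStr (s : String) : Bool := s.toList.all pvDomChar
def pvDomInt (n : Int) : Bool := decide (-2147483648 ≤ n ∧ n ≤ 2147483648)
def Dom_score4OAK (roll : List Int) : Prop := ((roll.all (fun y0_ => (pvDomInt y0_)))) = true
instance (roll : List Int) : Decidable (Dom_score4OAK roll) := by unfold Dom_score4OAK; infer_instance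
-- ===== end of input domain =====

-- ===== PORT A =====
-- B sorts the roll and looks for a die equal to the one three places later (sort + one
-- adjacent-gap scan, O(n log n)); A rescans the roll with roll.count for every die (O(n^2)).
def score4OAK (roll : List Int) : Int :=
  let valid := roll.foldl (fun v num => if (roll.count num : Int) ≥ 4 then true else v) false
  if valid then roll.foldl (fun score num => score + num) 0 else 0

-- ===== PORT B =====
def score4OAK_alt (roll : List Int) : Int :=
  let s := PySem.List.sorted roll (fun x => x) false
  if (s.zip (PySem.List.slice s (some 3) none)).any (fun p => p.1 == p.2) then
    (roll.map (fun num => num)).sum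
  else 0

-- ===== PRECONDITION & SPEC =====
def Spec_score4OAK (roll : List Int) (out : Int) : Prop := out = score4OAK_alt roll
instance (roll : List Int) (out : Int) : Decidable (Spec_score4OAK roll out) := by unfold Spec_score4OAK; infer_instance

-- ===== CLAIM (what is proved, stated in full; the proofs are below) =====
def Claim_equal_score4OAK : Prop := ∀ (roll : List Int), Dom_score4OAK roll → Spec_score4OAK roll (score4OAK roll)

-- ===== LEMMAS AND PROOFS =====

-- A's validity loop is 'some die occurs >= 4 times', folded with an if-true accumulator
theorem foldl_if_true (roll xs : List Int) (b : Bool) :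
    xs.foldl (fun v num => if ((roll.count num : Int)) ≥ 4 then true else v) b
      = (b || xs.any (fun num => decide ((roll.count num : Int) ≥ 4))) := by
  induction xs generalizing b with
  | nil => simp
  | cons x xs ih =>
      simp only [List.foldl_cons, List.any_cons, ih]
      by_cases h : ((roll.count x : Int)) ≥ 4 <;> simp [h]

-- In a nondecreasing list, 's[i] = s[i+3] for some i' is exactly 'some value occurs >= 4 times'.
theorem gap3_iff_count4 (s : List Int) (hs : s.Pairwise (· ≤ ·)) :
    ((s.zip (s.drop 3)).any (fun p => p.1 == p.2) = true) ↔ ∃ x : Int, 4 ≤ s.count x := by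
  have hmono : ∀ (i j : Nat) (hj : j < s.length) (hij : i ≤ j), s[i]'(by omega) ≤ s[j] := by
    intro i j hj hij
    rcases Nat.eq_or_lt_of_le hij with h | h
    · subst h; rfl
    · exact (List.pairwise_iff_getElem.mp hs) i j (by omega) hj h
  constructor
  · rintro h
    rcases List.any_eq_true.mp h with ⟨⟨a, b⟩, hmem, heq⟩
    rcases List.mem_iff_getElem.mp hmem with ⟨i, hi, hget⟩
    have hlen : i + 3 < s.length := by
      simp [List.length_zip, List.length_drop] at hi; omega
    rw [List.getElem_zip] at hget
    injection hget with ha hb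
    have hdrop : (s.drop 3)[i]'(by simp [List.length_drop]; omega) = s[i + 3]'(by omega) := by
      rw [List.getElem_drop]; congr 1; omega
    have hab : a = b := by simpa using heq
    have heq' : s[i]'(by omega) = s[i + 3]'(by omega) :=
      (ha.trans hab).trans (hb.symm.trans hdrop)
    -- the segment s[i..i+3] is constant, so s[i] occurs at least 4 times
    refine ⟨s[i]'(by omega), ?_⟩
    have hseg : (s.drop i).take 4 = List.replicate 4 (s[i]'(by omega)) := by
      apply List.ext_getElem
      · simp [List.length_take, List.length_drop]; omega
      · intro j hj hj'
        simp only [List.length_replicate] at hj'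
        rw [List.getElem_replicate, List.getElem_take, List.getElem_drop]
        have h1 : s[i]'(by omega) ≤ s[i + j]'(by omega) := hmono i (i + j) (by omega) (by omega)
        have h2 : s[i + j]'(by omega) ≤ s[i + 3]'(by omega) := hmono (i + j) (i + 3) (by omega) (by omega)
        omega
    have hsub : List.Sublist ((s.drop i).take 4) s :=
      ((s.drop i).take_sublist 4).trans (s.drop_sublist i)
    have := hsub.count_le (s[i]'(by omega))
    rw [hseg] at this
    simpa using this
  · rintro ⟨x, hx⟩
    have hsub : List.Sublist (List.replicate 4 x) s := List.replicate_sublist_iff.mpr hx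
    rcases List.sublist_iff_exists_fin_orderEmbedding_get_eq.mp hsub with ⟨f, hf⟩
    have hlen4 : (List.replicate 4 x).length = 4 := by simp
    have hv : ∀ (k : Fin (List.replicate 4 x).length), s.get (f k) = x := by
      intro k; rw [← hf k, List.get_eq_getElem, List.getElem_replicate]
    have h03 : (f ⟨0, by omega⟩ : Fin s.length).val + 3 ≤ (f ⟨3, by omega⟩ : Fin s.length).val := by
      have h01 : f ⟨0, by omega⟩ < f ⟨1, by omega⟩ := f.strictMono (by simp)
      have h12 : f ⟨1, by omega⟩ < f ⟨2, by omega⟩ := f.strictMono (by simp)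
      have h23 : f ⟨2, by omega⟩ < f ⟨3, by omega⟩ := f.strictMono (by simp)
      simp only [Fin.lt_def] at h01 h12 h23
      omega
    set i : Nat := (f ⟨0, by omega⟩ : Fin s.length).val with hi
    set j : Nat := (f ⟨3, by omega⟩ : Fin s.length).val with hj
    have hjlen : j < s.length := (f ⟨3, by omega⟩).isLt
    have hsi : s[i]'(by omega) = x := by
      have := hv ⟨0, by omega⟩; rwa [List.get_eq_getElem] at this
    have hsj : s[j]'(by omega) = x := by
      have := hv ⟨3, by omega⟩; rwa [List.get_eq_getElem] at this
    have h1 : s[i]'(by omega) ≤ s[i + 3]'(by omega) := hmono i (i + 3) (by omega) (by omega)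
    have h2 : s[i + 3]'(by omega) ≤ s[j]'(by omega) := hmono (i + 3) j (by omega) (by omega)
    apply List.any_eq_true.mpr
    refine ⟨(s[i]'(by omega), s[i + 3]'(by omega)), ?_, by simp; omega⟩
    apply List.mem_iff_getElem.mpr
    refine ⟨i, by simp [List.length_zip, List.length_drop]; omega, ?_⟩
    have hdrop : (s.drop 3)[i]'(by simp [List.length_drop]; omega) = s[i + 3]'(by omega) := by
      rw [List.getElem_drop]; congr 1; omega
    rw [List.getElem_zip, hdrop]

-- ===== VERDICT (by name: the statement is the Claim_ definition above) =====
theorem score4OAK_spec : Claim_equal_score4OAK := by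
  intro roll _
  unfold Spec_score4OAK score4OAK score4OAK_alt
  simp only []
  rw [foldl_if_true roll roll]
  have hslice : PySem.List.slice (PySem.List.sorted roll (fun x => x) false) (some 3) none
      = (PySem.List.sorted roll (fun x => x) false).drop 3 := by
    simpa using PySem.List.slice_from_natCast (PySem.List.sorted roll (fun x => x) false) 3
  rw [hslice]
  have hperm : (PySem.List.sorted roll (fun x => x) false).Perm roll :=
    PySem.List.sorted_perm ..
  have hpw : (PySem.List.sorted roll (fun x => x) false).Pairwise (· ≤ ·) := by
    simpa using PySem.List.sorted_pairwise roll (fun x => x)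
  have hcond : (((PySem.List.sorted roll (fun x => x) false).zip
        ((PySem.List.sorted roll (fun x => x) false).drop 3)).any (fun p => p.1 == p.2))
      = (false || roll.any (fun num => decide ((roll.count num : Int) ≥ 4))) := by
    rw [Bool.false_or, Bool.eq_iff_iff, gap3_iff_count4 _ hpw]
    simp only [List.any_eq_true, decide_eq_true_eq]
    constructor
    · rintro ⟨x, hx⟩
      rw [hperm.count_eq] at hx
      refine ⟨x, List.count_pos_iff.mp (by omega), by exact_mod_cast hx⟩
    · rintro ⟨x, _, hx⟩
      exact ⟨x, by rw [hperm.count_eq]; exact_mod_cast hx⟩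
  rw [hcond]
  split
  · rw [List.map_id_fun', id, List.sum_eq_foldl]
  · rfl
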